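-- pv_equiv track=rewrite | github.com/shinelotto/shinelotto.github.io | blueprints/dlt_bp.py | calculate_repeat_and_adjacent_numbers_v2
-- ===== SOURCE A (Python) =====
-- def calculate_repeat_and_adjacent_numbers_v2(current_balls, all_previous_data, current_index, ball_type='front'):
--     """计算重号和邻号数量 - 与前端JS逻辑保持一致"""
--     if current_index == 0 or not all_previous_data:
--         return 0, 0  # 第一期没有重号和邻号
--
--     prev_balls = all_previous_data[current_index - 1]['balls']
--
--     # 重号：当前期号码在上期也出现过
--     repeat_numbers = set(current_balls) & set(prev_balls)
--     repeat_count = len(repeat_numbers)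
--
--     # 邻号：当前期号码与上期号码相差±1
--     adjacent_count = 0
--     for curr_ball in current_balls:
--         for prev_ball in prev_balls:
--             if abs(curr_ball - prev_ball) == 1:
--                 adjacent_count += 1
--                 break  # 每个号码只算一次（避免重复计数）
--
--     return repeat_count, adjacent_count
-- ===== SOURCE B (Python) =====
-- def calculate_repeat_and_adjacent_numbers_v2(current_balls, all_previous_data, current_index, ball_type='front'):
--     if current_index == 0 or not all_previous_data:
--         return 0, 0
--     prev_balls = all_previous_data[current_index - 1]['balls']
--     prev_set = set(prev_balls)
--     repeat_count = sum(1 for b in set(current_balls) if b in prev_set)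
--     neighbors = {b + 1 for b in prev_balls} | {b - 1 for b in prev_balls}
--     adjacent_count = sum(1 for b in current_balls if b in neighbors)
--     return repeat_count, adjacent_count
-- ===== Notes on version B (the rewrite author's own statement) =====
-- stated objective: faster
-- what changed: Replaces the nested O(n*m) adjacency scan with a precomputed hash set of neighbor values ({b+1}|{b-1} over the previous draw) and a single membership pass over the current balls, and computes the repeat count as a 0/1 membership sum over the deduplicated current draw instead of materialising the set intersection.
import Mathlib
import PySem

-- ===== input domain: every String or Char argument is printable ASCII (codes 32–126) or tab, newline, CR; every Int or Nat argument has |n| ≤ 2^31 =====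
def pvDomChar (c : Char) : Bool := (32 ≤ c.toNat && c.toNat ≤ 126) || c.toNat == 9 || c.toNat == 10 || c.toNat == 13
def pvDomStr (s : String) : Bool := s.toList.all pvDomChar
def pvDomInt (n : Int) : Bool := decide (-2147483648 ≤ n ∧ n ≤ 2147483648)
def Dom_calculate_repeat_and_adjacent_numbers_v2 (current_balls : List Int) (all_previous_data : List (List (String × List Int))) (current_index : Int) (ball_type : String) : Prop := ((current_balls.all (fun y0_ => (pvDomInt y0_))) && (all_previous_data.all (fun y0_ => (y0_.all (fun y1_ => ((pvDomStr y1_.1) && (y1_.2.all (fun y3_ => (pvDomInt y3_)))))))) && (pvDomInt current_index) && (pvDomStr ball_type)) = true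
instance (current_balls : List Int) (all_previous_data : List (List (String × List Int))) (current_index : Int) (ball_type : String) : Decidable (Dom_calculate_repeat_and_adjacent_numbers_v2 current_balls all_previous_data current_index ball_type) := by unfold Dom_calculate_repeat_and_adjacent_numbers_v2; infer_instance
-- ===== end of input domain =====

-- B precomputes a neighbor-value set from the previous draw and counts both statistics by
-- single membership passes, replacing A's nested adjacency scan (objective: faster).


-- ===== PORT A =====
-- inner 'for prev_ball in prev_balls: if abs(curr-prev)==1: adjacent+=1; break'
def pvAdjInner (curr : Int) (prev : List Int) : Int :=
  match prev with
  | [] => 0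
  | p :: rest => if (curr - p).natAbs == 1 then 1 else pvAdjInner curr rest

def calculate_repeat_and_adjacent_numbers_v2 (current_balls : List Int) (all_previous_data : List (List (String × List Int))) (current_index : Int) (ball_type : String) : Int × Int :=
  if current_index == 0 || all_previous_data.isEmpty then (0, 0)
  else
    match PySem.List.pyGet? all_previous_data (current_index - 1) with
    | none => (0, 0)  -- IndexError in Python; excluded by Pre_
    | some entry =>
      match entry.lookup "balls" with
      | none => (0, 0)  -- KeyError in Python; excluded by Pre_
      | some prev_balls =>
        let repeat_numbers : PySem.Set Int := PySem.Set.inter (PySem.Set.ofList current_balls) (PySem.Set.ofList prev_balls)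
        let repeat_count : Int := PySem.Set.len repeat_numbers
        let adjacent_count : Int := current_balls.foldl (fun acc c => acc + pvAdjInner c prev_balls) 0
        (repeat_count, adjacent_count)

-- ===== PORT B =====
def calculate_repeat_and_adjacent_numbers_v2_alt (current_balls : List Int) (all_previous_data : List (List (String × List Int))) (current_index : Int) (ball_type : String) : Int × Int :=
  if current_index == 0 || all_previous_data.isEmpty then (0, 0)
  else
    match PySem.List.pyGet? all_previous_data (current_index - 1) with
    | none => (0, 0)  -- IndexError in Python; excluded by Pre_
    | some entry =>
      match entry.lookup "balls" with
      | none => (0, 0)  -- KeyError in Python; excluded by Pre_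
      | some prev_balls =>
        let prev_set : PySem.Set Int := PySem.Set.ofList prev_balls
        let repeat_count : Int := ((PySem.Set.ofList current_balls).map (fun b => if PySem.Set.contains prev_set b then (1 : Int) else 0)).sum
        let neighbors : PySem.Set Int := PySem.Set.union (PySem.Set.ofList (prev_balls.map (· + 1))) (prev_balls.map (· - 1))
        let adjacent_count : Int := (current_balls.map (fun b => if PySem.Set.contains neighbors b then (1 : Int) else 0)).sum
        (repeat_count, adjacent_count)

-- ===== PRECONDITION & SPEC =====
-- Pre_ excludes exactly the inputs where A raises: an index current_index-1 outside Python's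
-- (wraparound) range for all_previous_data, or an indexed record without a "balls" key.
def Pre_calculate_repeat_and_adjacent_numbers_v2 (current_balls : List Int) (all_previous_data : List (List (String × List Int))) (current_index : Int) (ball_type : String) : Prop :=
  current_index = 0 ∨ all_previous_data = [] ∨
    ((PySem.List.pyGet? all_previous_data (current_index - 1)).any (fun e => (e.lookup "balls").isSome) = true)
instance (current_balls : List Int) (all_previous_data : List (List (String × List Int))) (current_index : Int) (ball_type : String) : Decidable (Pre_calculate_repeat_and_adjacent_numbers_v2 current_balls all_previous_data current_index ball_type) := by unfold Pre_calculate_repeat_and_adjacent_numbers_v2; infer_instance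

def pvWitness_calculate_repeat_and_adjacent_numbers_v2 : List Int × (List (List (String × List Int))) × Int × String :=
  ([1, 2], [[("balls", [2, 5])]], 1, "front")

def Spec_calculate_repeat_and_adjacent_numbers_v2 (current_balls : List Int) (all_previous_data : List (List (String × List Int))) (current_index : Int) (ball_type : String) (out : Int × Int) : Prop := out = calculate_repeat_and_adjacent_numbers_v2_alt current_balls all_previous_data current_index ball_type
instance (current_balls : List Int) (all_previous_data : List (List (String × List Int))) (current_index : Int) (ball_type : String) (out : Int × Int) : Decidable (Spec_calculate_repeat_and_adjacent_numbers_v2 current_balls all_previous_data current_index ball_type out) := by unfold Spec_calculate_repeat_and_adjacent_numbers_v2; infer_instance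

-- ===== CLAIM (what is proved, stated in full; the proofs are below) =====
def Claim_equal_calculate_repeat_and_adjacent_numbers_v2 : Prop := ∀ (current_balls : List Int) (all_previous_data : List (List (String × List Int))) (current_index : Int) (ball_type : String), Dom_calculate_repeat_and_adjacent_numbers_v2 current_balls all_previous_data current_index ball_type → Pre_calculate_repeat_and_adjacent_numbers_v2 current_balls all_previous_data current_index ball_type → Spec_calculate_repeat_and_adjacent_numbers_v2 current_balls all_previous_data current_index ball_type (calculate_repeat_and_adjacent_numbers_v2 current_balls all_previous_data current_index ball_type)

-- ===== LEMMAS AND PROOFS =====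

-- membership in B's neighbor set ↔ some previous ball differs by exactly 1
theorem pvNbr_mem (curr : Int) (prev : List Int) :
    (PySem.Set.contains (PySem.Set.union (PySem.Set.ofList (prev.map (· + 1))) (prev.map (· - 1))) curr = true)
      ↔ ∃ q ∈ prev, (curr - q).natAbs = 1 := by
  rw [PySem.Set.contains_iff, PySem.Set.mem_union, PySem.Set.mem_ofList]
  simp only [List.mem_map]
  constructor
  · rintro (⟨q, hq, rfl⟩ | ⟨q, hq, rfl⟩) <;> exact ⟨q, hq, by omega⟩
  · rintro ⟨q, hq, h⟩
    rcases (by omega : curr = q + 1 ∨ curr = q - 1) with h' | h'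
    · exact Or.inl ⟨q, hq, h'.symm⟩
    · exact Or.inr ⟨q, hq, h'.symm⟩

-- A's inner break-loop returns 1 exactly when the current ball lies in B's neighbor set
theorem pvAdjInner_eq_ite (curr : Int) (prev : List Int) :
    pvAdjInner curr prev =
      if PySem.Set.contains (PySem.Set.union (PySem.Set.ofList (prev.map (· + 1))) (prev.map (· - 1))) curr then 1 else 0 := by
  induction prev with
  | nil => simp [pvAdjInner, PySem.Set.union, PySem.Set.ofList]
  | cons p rest ih =>
    simp only [pvAdjInner]
    by_cases h : (curr - p).natAbs = 1
    · have hb : ((curr - p).natAbs == 1) = true := by simp [h]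
      have hc := (pvNbr_mem curr (p :: rest)).mpr ⟨p, List.mem_cons_self, h⟩
      rw [if_pos hb, if_pos hc]
    · have hb : ((curr - p).natAbs == 1) = false := by simp [h]
      rw [if_neg (by simp [hb]), ih]
      by_cases hr : ∃ q ∈ rest, (curr - q).natAbs = 1
      · rcases hr with ⟨q, hq, hq1⟩
        rw [if_pos ((pvNbr_mem curr rest).mpr ⟨q, hq, hq1⟩),
            if_pos ((pvNbr_mem curr (p :: rest)).mpr ⟨q, List.mem_cons_of_mem _ hq, hq1⟩)]
      · rw [if_neg (fun hcon => hr ((pvNbr_mem curr rest).mp hcon)),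
            if_neg (fun hcon => by
              rcases (pvNbr_mem curr (p :: rest)).mp hcon with ⟨q, hq, hq1⟩
              rcases List.mem_cons.mp hq with rfl | hq'
              · exact h hq1
              · exact hr ⟨q, hq', hq1⟩)]

-- the two adjacency totals agree
theorem pvAdj_total_eq (cur prev : List Int) :
    cur.foldl (fun acc c => acc + pvAdjInner c prev) 0 =
      (cur.map (fun b => if PySem.Set.contains (PySem.Set.union (PySem.Set.ofList (prev.map (· + 1))) (prev.map (· - 1))) b then (1 : Int) else 0)).sum := by
  rw [PySem.List.foldl_add]
  simp [pvAdjInner_eq_ite]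

-- the two repeat counts agree
theorem pvRepeat_eq (cur prev : List Int) :
    (PySem.Set.len (PySem.Set.inter (PySem.Set.ofList cur) (PySem.Set.ofList prev)) : Int) =
      ((PySem.Set.ofList cur).map (fun b => if PySem.Set.contains (PySem.Set.ofList prev) b then (1 : Int) else 0)).sum := by
  rw [PySem.List.sum_map_ite_one_zero]
  simp only [PySem.Set.inter, PySem.Set.len, List.countP_eq_length_filter]

-- ===== VERDICT (by name: the statement is the Claim_ definition above) =====
theorem calculate_repeat_and_adjacent_numbers_v2_spec : Claim_equal_calculate_repeat_and_adjacent_numbers_v2 := by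
  intro cur data idx bt _ _
  unfold Spec_calculate_repeat_and_adjacent_numbers_v2
  unfold calculate_repeat_and_adjacent_numbers_v2 calculate_repeat_and_adjacent_numbers_v2_alt
  split
  · rfl
  · cases h1 : PySem.List.pyGet? data (idx - 1) with
    | none => rfl
    | some entry =>
      dsimp only
      cases h2 : entry.lookup "balls" with
      | none => rfl
      | some prev =>
        dsimp only
        simp only [Prod.mk.injEq]
        exact ⟨pvRepeat_eq cur prev, pvAdj_total_eq cur prev⟩
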